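-- pv_equiv track=rewrite | github.com/Priscigs/LabA_DLP | TokensReader2.py | validate_parentheses
-- ===== SOURCE A (Python) =====
-- def validate_parentheses(value):
--     count = 0
--     for char in value:
--         if char == '(':
--             count += 1
--         elif char == ')':
--             count -= 1
--         if count < 0:
--             return False
--     return count == 0
-- ===== SOURCE B (Python) =====
-- def validate_parentheses(value):
--     s = ''.join(c for c in value if c in '()')
--     while '()' in s:
--         s = s.replace('()', '')
--     return s == ''
-- ===== Notes on version B (the rewrite author's own statement) =====
-- stated objective: alternative
-- what changed: Replaces the single-pass counter with a rewriting algorithm: drop all non-parenthesis characters, then repeatedly delete adjacent open-close pairs until none remain; the string is balanced iff the normal form is empty.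
import Mathlib
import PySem

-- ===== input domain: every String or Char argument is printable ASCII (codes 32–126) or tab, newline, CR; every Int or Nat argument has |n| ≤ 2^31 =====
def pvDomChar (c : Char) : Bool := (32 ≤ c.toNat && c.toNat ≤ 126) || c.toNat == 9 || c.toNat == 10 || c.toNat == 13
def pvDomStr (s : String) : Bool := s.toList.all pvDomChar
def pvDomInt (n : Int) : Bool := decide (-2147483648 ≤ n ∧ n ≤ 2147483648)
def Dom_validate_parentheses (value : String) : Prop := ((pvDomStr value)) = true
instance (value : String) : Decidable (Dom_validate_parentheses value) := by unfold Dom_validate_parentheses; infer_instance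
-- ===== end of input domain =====

-- B replaces A's counter loop with repeated rewriting: filter to parentheses, delete adjacent open-close pairs until none remain, accept iff empty (alternative algorithm; not faster).


-- ===== PORT A =====
-- A's loop with early return, as structural recursion over the characters with the counter as state.
def vpLoopA : List Char → Int → Bool
  | [], count => count == 0
  | c :: rest, count =>
    let count' := if c = '(' then count + 1 else if c = ')' then count - 1 else count
    if count' < 0 then false else vpLoopA rest count'

def validate_parentheses (value : String) : Bool := vpLoopA value.toList 0

-- ===== PORT B =====
-- c in '()'
def vpIsParen (c : Char) : Bool := c == '(' || c == ')'

-- '()' in s : an adjacent pair '(' ')' occurs somewhere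
def vpHasPair : List Char → Bool
  | [] => false
  | [_] => false
  | c :: d :: rest => if c = '(' ∧ d = ')' then true else vpHasPair (d :: rest)

-- s.replace('()', '') : left-to-right removal of the non-overlapping '()' occurrences
def vpRemovePairs : List Char → List Char
  | [] => []
  | [c] => [c]
  | c :: d :: rest =>
    if c = '(' ∧ d = ')' then vpRemovePairs rest else c :: vpRemovePairs (d :: rest)

-- termination lemmas for the while loop below
theorem vpRemovePairs_length_le : ∀ (l : List Char),
    (vpRemovePairs l).length ≤ l.length := by
  intro l
  induction l using vpRemovePairs.induct with
  | case1 => simp [vpRemovePairs]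
  | case2 => simp [vpRemovePairs]
  | case3 c d rest h ih =>
    simp only [vpRemovePairs]; rw [if_pos h]
    simp only [List.length_cons] at ih ⊢; omega
  | case4 c d rest h ih =>
    simp only [vpRemovePairs]; rw [if_neg h]
    simp only [List.length_cons] at ih ⊢; omega

theorem vpRemovePairs_length_lt : ∀ (l : List Char), vpHasPair l = true →
    (vpRemovePairs l).length < l.length := by
  intro l
  induction l using vpRemovePairs.induct with
  | case1 => simp [vpHasPair]
  | case2 => simp [vpHasPair]
  | case3 c d rest h ih =>
    intro _
    simp only [vpRemovePairs]; rw [if_pos h]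
    have := vpRemovePairs_length_le rest
    simp only [List.length_cons]; omega
  | case4 c d rest h ih =>
    intro hp
    rw [vpHasPair, if_neg h] at hp
    simp only [vpRemovePairs]; rw [if_neg h]
    have := ih hp
    simp only [List.length_cons] at this ⊢; omega

-- while '()' in s: s = s.replace('()', '')
def vpReduce (l : List Char) : List Char :=
  if h : vpHasPair l = true then vpReduce (vpRemovePairs l) else l
termination_by l.length
decreasing_by exact vpRemovePairs_length_lt l h

def validate_parentheses_alt (value : String) : Bool :=
  vpReduce (value.toList.filter vpIsParen) == []

-- ===== PRECONDITION & SPEC =====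
def Spec_validate_parentheses (value : String) (out : Bool) : Prop := out = validate_parentheses_alt value
instance (value : String) (out : Bool) : Decidable (Spec_validate_parentheses value out) := by unfold Spec_validate_parentheses; infer_instance

-- ===== CLAIM (what is proved, stated in full; the proofs are below) =====
def Claim_equal_validate_parentheses : Prop := ∀ (value : String), Dom_validate_parentheses value → Spec_validate_parentheses value (validate_parentheses value)

-- ===== LEMMAS AND PROOFS =====

-- one step of A's loop, spelled out
theorem vpLoopA_cons (c : Char) (rest : List Char) (k : Int) :
    vpLoopA (c :: rest) k =
      (if (if c = '(' then k + 1 else if c = ')' then k - 1 else k) < 0 then false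
       else vpLoopA rest (if c = '(' then k + 1 else if c = ')' then k - 1 else k)) := rfl

-- dropping non-parenthesis characters does not change A's run (from a nonnegative counter)
theorem vpLoopA_filter : ∀ (l : List Char) (k : Int), 0 ≤ k →
    vpLoopA (l.filter vpIsParen) k = vpLoopA l k := by
  intro l
  induction l with
  | nil => intro k hk; rfl
  | cons c rest ih =>
    intro k hk
    by_cases hp : vpIsParen c = true
    · rw [List.filter_cons, if_pos hp, vpLoopA_cons, vpLoopA_cons]
      by_cases hneg : (if c = '(' then k + 1 else if c = ')' then k - 1 else k) < 0
      · rw [if_pos hneg, if_pos hneg]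
      · rw [if_neg hneg, if_neg hneg]
        refine ih _ ?_
        split_ifs at hneg ⊢ <;> omega
    · have hc1 : ¬ c = '(' := by intro h; simp [vpIsParen, h] at hp
      have hc2 : ¬ c = ')' := by intro h; simp [vpIsParen, h] at hp
      rw [List.filter_cons, if_neg (by simp [hp]), vpLoopA_cons,
          if_neg hc1, if_neg hc2, if_neg (by omega : ¬ k < 0)]
      exact ih k hk

-- removing the '()' pairs does not change A's run (from a nonnegative counter)
theorem vpLoopA_removePairs : ∀ (l : List Char) (k : Int), 0 ≤ k →
    vpLoopA (vpRemovePairs l) k = vpLoopA l k := by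
  intro l
  induction l using vpRemovePairs.induct with
  | case1 => intro k hk; rfl
  | case2 => intro k hk; rfl
  | case3 c d rest h ih =>
    intro k hk
    obtain ⟨hc, hd⟩ := h; subst hc; subst hd
    simp only [vpRemovePairs]
    norm_num
    rw [ih k hk, vpLoopA_cons, if_pos rfl, if_neg (by omega : ¬ k + 1 < 0),
        vpLoopA_cons, if_neg (by decide : ¬ (')' : Char) = '('), if_pos rfl,
        if_neg (by omega : ¬ k + 1 - 1 < 0)]
    norm_num
  | case4 c d rest h ih =>
    intro k hk
    simp only [vpRemovePairs]; rw [if_neg h, vpLoopA_cons, vpLoopA_cons]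
    by_cases hneg : (if c = '(' then k + 1 else if c = ')' then k - 1 else k) < 0
    · rw [if_pos hneg, if_pos hneg]
    · rw [if_neg hneg, if_neg hneg]
      refine ih _ ?_
      split_ifs at hneg ⊢ <;> omega

-- the whole while loop does not change A's run
theorem vpLoopA_reduce : ∀ (l : List Char) (k : Int), 0 ≤ k →
    vpLoopA (vpReduce l) k = vpLoopA l k := by
  intro l
  induction l using vpReduce.induct with
  | case1 l hp ih =>
    intro k hk
    rw [vpReduce, dif_pos hp, ih k hk, vpLoopA_removePairs l k hk]
  | case2 l hp =>
    intro k hk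
    rw [vpReduce, dif_neg hp]

-- the loop result contains no '()'
theorem vpHasPair_reduce (l : List Char) : vpHasPair (vpReduce l) = false := by
  induction l using vpReduce.induct with
  | case1 l hp ih => rw [vpReduce, dif_pos hp]; exact ih
  | case2 l hp => rw [vpReduce, dif_neg hp]; simpa using hp

-- removing pairs / the loop preserve "every character is a parenthesis"
theorem vpRemovePairs_paren : ∀ (l : List Char), (∀ c ∈ l, vpIsParen c = true) →
    ∀ c ∈ vpRemovePairs l, vpIsParen c = true := by
  intro l
  induction l using vpRemovePairs.induct with
  | case1 => intro _ c hc; simp [vpRemovePairs] at hc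
  | case2 c => intro h d hd; simp [vpRemovePairs] at hd; exact h d (by simp [hd])
  | case3 c d rest h ih =>
    intro hall e he
    simp only [vpRemovePairs] at he; rw [if_pos h] at he
    exact ih (fun x hx => hall x (by simp [hx])) e he
  | case4 c d rest h ih =>
    intro hall e he
    simp only [vpRemovePairs] at he; rw [if_neg h] at he
    rcases List.mem_cons.mp he with h1 | h1
    · exact hall e (by simp [h1])
    · exact ih (fun x hx => hall x (by simp at hx ⊢; tauto)) e h1

theorem vpReduce_paren (l : List Char) (h : ∀ c ∈ l, vpIsParen c = true) :
    ∀ c ∈ vpReduce l, vpIsParen c = true := by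
  induction l using vpReduce.induct with
  | case1 l hp ih =>
    rw [vpReduce, dif_pos hp]
    exact ih (vpRemovePairs_paren l h)
  | case2 l hp => rw [vpReduce, dif_neg hp]; exact h

-- a pair-free parenthesis string that starts with '(' consists only of '('
theorem vpAllOpen : ∀ (rest : List Char), (∀ c ∈ rest, vpIsParen c = true) →
    vpHasPair ('(' :: rest) = false → ∀ c ∈ rest, c = '(' := by
  intro rest
  induction rest with
  | nil => intro _ _ c hc; simp at hc
  | cons d t ih =>
    intro hpar hnp c hc
    have hd : d = '(' := by
      have hdp := hpar d (by simp)
      by_cases hd' : d = ')'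
      · exfalso; rw [vpHasPair, if_pos ⟨rfl, hd'⟩] at hnp; simp at hnp
      · simp only [vpIsParen, Bool.or_eq_true, beq_iff_eq] at hdp; tauto
    have hnp' : vpHasPair ('(' :: t) = false := by
      rw [vpHasPair, if_neg (by simp [hd])] at hnp
      rw [← hd]; exact hnp
    rcases List.mem_cons.mp hc with h1 | h1
    · rw [h1, hd]
    · exact ih (fun x hx => hpar x (by simp [hx])) hnp' c h1

-- A on a string of only '(' from a nonnegative counter just checks the total count
theorem vpLoopA_open : ∀ (l : List Char) (k : Int), 0 ≤ k → (∀ c ∈ l, c = '(') →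
    vpLoopA l k = ((k + l.length : Int) == 0) := by
  intro l
  induction l with
  | nil => intro k hk _; simp [vpLoopA]
  | cons c rest ih =>
    intro k hk hall
    have hc : c = '(' := hall c (by simp)
    subst hc
    rw [vpLoopA_cons, if_pos rfl, if_neg (by omega : ¬ k + 1 < 0),
        ih (k + 1) (by omega) (fun d hd => hall d (by simp [hd]))]
    have harith : k + 1 + (rest.length : Int) = k + (('(' :: rest).length : Int) := by
      simp only [List.length_cons]; push_cast; ring
    rw [harith]
-- A's run on a pair-free parenthesis string decides emptiness
theorem vpLoopA_normal (l : List Char) (hpar : ∀ c ∈ l, vpIsParen c = true)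
    (hnp : vpHasPair l = false) : vpLoopA l 0 = (l == []) := by
  cases l with
  | nil => rfl
  | cons c rest =>
    have hc := hpar c (by simp)
    by_cases h1 : c = ')'
    · subst h1
      rw [vpLoopA_cons, if_neg (by decide : ¬ (')' : Char) = '('), if_pos rfl,
          if_pos (by omega : (0 : Int) - 1 < 0)]
      simp
    · have h2 : c = '(' := by
        simp only [vpIsParen, Bool.or_eq_true, beq_iff_eq] at hc; tauto
      subst h2
      have hall := vpAllOpen rest (fun x hx => hpar x (by simp [hx])) hnp
      rw [vpLoopA_cons, if_pos rfl, if_neg (by omega : ¬ (0 : Int) + 1 < 0),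
          vpLoopA_open rest (0 + 1) (by omega) hall]
      have h3 : ¬ ((1 : Int) + rest.length = 0) := by omega
      simp [h3]

-- ===== VERDICT (by name: the statement is the Claim_ definition above) =====
theorem validate_parentheses_spec : Claim_equal_validate_parentheses := by
  intro value _
  unfold Spec_validate_parentheses validate_parentheses validate_parentheses_alt
  have hpar : ∀ c ∈ value.toList.filter vpIsParen, vpIsParen c = true := by
    intro c hc; exact (List.mem_filter.mp hc).2
  rw [← vpLoopA_filter value.toList 0 (by omega),
      ← vpLoopA_reduce (value.toList.filter vpIsParen) 0 (by omega),
      vpLoopA_normal _ (vpReduce_paren _ hpar) (vpHasPair_reduce _)]
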